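-- pv_equiv track=rewrite | github.com/Zeet53/Automatic-SteamCMD-loader | RimInstaller/main.py | parse_steamcmd_commands
-- ===== SOURCE A (Python) =====
-- def parse_steamcmd_commands(commands_list):
--     result = []
--     current_cmd = []
--
--     for item in commands_list:
--         if item.startswith('+'):
--             if current_cmd:
--                 result.append(current_cmd)
--             current_cmd = [item]
--         else:
--             current_cmd.append(item)
--
--     if current_cmd:
--         result.append(current_cmd)
--
--     if len(result) > 3:
--         result = result[2:-1]
--     else:
--         result = []
--
--     return result
-- ===== SOURCE B (Python) =====
-- def parse_steamcmd_commands(commands_list):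
--     # Phase 1: split into groups, each = one element plus the following run of non-'+' items.
--     groups = []
--     i = 0
--     n = len(commands_list)
--     while i < n:
--         j = i + 1
--         while j < n and not commands_list[j].startswith('+'):
--             j += 1
--         groups.append(commands_list[i:j])
--         i = j
--     # Phase 2: trim.
--     return groups[2:-1] if len(groups) > 3 else []
-- ===== Notes on version B (the rewrite author's own statement) =====
-- stated objective: simpler
-- what changed: Replaces A's single accumulating loop with (result, current_cmd) state by a two-phase index-then-slice decomposition: an outer loop that peels off one whole group per step (an element plus the following run of non-'+' items, taken by slicing), then the same [2:-1] trim.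
import Mathlib
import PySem

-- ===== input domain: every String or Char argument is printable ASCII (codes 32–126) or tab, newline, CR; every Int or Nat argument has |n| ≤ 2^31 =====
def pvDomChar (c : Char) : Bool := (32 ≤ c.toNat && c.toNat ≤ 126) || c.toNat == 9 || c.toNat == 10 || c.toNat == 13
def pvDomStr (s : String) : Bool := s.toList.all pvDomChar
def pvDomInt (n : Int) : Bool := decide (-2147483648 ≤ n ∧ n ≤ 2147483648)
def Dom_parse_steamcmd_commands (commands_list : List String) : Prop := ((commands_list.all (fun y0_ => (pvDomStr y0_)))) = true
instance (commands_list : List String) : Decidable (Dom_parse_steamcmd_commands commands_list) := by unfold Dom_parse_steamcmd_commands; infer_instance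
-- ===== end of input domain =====

-- B replaces A's accumulating (result, current_cmd) loop by a two-phase decomposition
-- (recursive group splitter, then the same [2:-1] trim); objective: simpler.


-- ===== PORT A =====
def pvStepA (st : List (List String) × List String) (item : String) : List (List String) × List String :=
  if PySem.Str.startswith item "+" then
    (if st.2 ≠ [] then st.1 ++ [st.2] else st.1, [item])
  else
    (st.1, st.2 ++ [item])

def pvFinalizeA (st : List (List String) × List String) : List (List String) :=
  if st.2 ≠ [] then st.1 ++ [st.2] else st.1

def parse_steamcmd_commands (commands_list : List String) : List (List String) :=
  let st := commands_list.foldl pvStepA ([], [])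
  let result := pvFinalizeA st
  if result.length > 3 then PySem.List.slice result (some 2) (some (-1)) else []

-- ===== PORT B =====
def pvNotPlus (s : String) : Bool := !(PySem.Str.startswith s "+")

-- one group = head element plus the following run of non-'+' items (the inner while loop)
def pvSplit : List String → List (List String)
  | [] => []
  | x :: xs =>
      (x :: xs.takeWhile pvNotPlus) :: pvSplit (xs.dropWhile pvNotPlus)
termination_by xs => xs.length
decreasing_by
  simpa using Nat.lt_succ_of_le (List.length_dropWhile_le _ _)

def parse_steamcmd_commands_alt (commands_list : List String) : List (List String) :=
  let groups := pvSplit commands_list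
  if groups.length > 3 then PySem.List.slice groups (some 2) (some (-1)) else []

-- ===== PRECONDITION & SPEC =====
def Spec_parse_steamcmd_commands (commands_list : List String) (out : List (List String)) : Prop := out = parse_steamcmd_commands_alt commands_list
instance (commands_list : List String) (out : List (List String)) : Decidable (Spec_parse_steamcmd_commands commands_list out) := by unfold Spec_parse_steamcmd_commands; infer_instance

-- ===== CLAIM (what is proved, stated in full; the proofs are below) =====
def Claim_equal_parse_steamcmd_commands : Prop := ∀ (commands_list : List String), Dom_parse_steamcmd_commands commands_list → Spec_parse_steamcmd_commands commands_list (parse_steamcmd_commands commands_list)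

-- ===== LEMMAS AND PROOFS =====

-- A's loop with a nonempty in-progress group, finalized, is that group extended by the
-- next run of non-'+' items, followed by B's splitter on the remainder.
theorem pvLoopA (xs : List String) (res : List (List String)) (cur : List String)
    (h : cur ≠ []) :
    pvFinalizeA (xs.foldl pvStepA (res, cur)) =
      res ++ (cur ++ xs.takeWhile pvNotPlus) :: pvSplit (xs.dropWhile pvNotPlus) := by
  induction xs generalizing res cur with
  | nil => simp [pvFinalizeA, pvSplit, h]
  | cons y ys ih =>
    by_cases hp : PySem.Chars.startswith y.toList ['+'] = true
    · have hstep : pvStepA (res, cur) y = (res ++ [cur], [y]) := by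
        simp [pvStepA, hp, h]
      rw [List.foldl_cons, hstep, ih _ _ (by simp)]
      have hnp : pvNotPlus y = false := by simp [pvNotPlus, hp]
      simp [hnp, pvSplit]
    · have hstep : pvStepA (res, cur) y = (res, cur ++ [y]) := by
        simp [pvStepA, hp]
      rw [List.foldl_cons, hstep, ih _ _ (by simp)]
      have hnp : pvNotPlus y = true := by simp [pvNotPlus, hp]
      simp [hnp]

theorem pvGroupsEq (commands_list : List String) :
    pvFinalizeA (commands_list.foldl pvStepA ([], [])) = pvSplit commands_list := by
  cases commands_list with
  | nil => simp [pvFinalizeA, pvSplit]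
  | cons x xs =>
    have hstep : pvStepA ([], []) x = ([], [x]) := by
      simp [pvStepA]
    rw [List.foldl_cons, hstep, pvLoopA xs [] [x] (by simp)]
    simp [pvSplit]

-- ===== VERDICT (by name: the statement is the Claim_ definition above) =====
theorem parse_steamcmd_commands_spec : Claim_equal_parse_steamcmd_commands := by
  intro commands_list _
  unfold Spec_parse_steamcmd_commands parse_steamcmd_commands parse_steamcmd_commands_alt
  simp only [pvGroupsEq]
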